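-- pv_equiv track=rewrite | github.com/devraphy/algorithm | algorithm/sorting/radix_sort_10.py | cs5
-- ===== SOURCE A (Python) =====
-- from typing import List
--
-- def cs5(nums:List[int], digit:int) -> List[int]:
--   count_array = [0] * 10
--   for num in nums:
--     count_idx = num // pow(10, digit) % 10
--     count_array[count_idx] += 1
--
--   acc_array = []
--   acc_count = 0
--   for count in count_array:
--     acc_count += count
--     acc_array.append(acc_count)
--
--   end_locs = [d - 1 for d in acc_array]
--   sorted= [0] * len(nums)
--
--   for num in reversed(nums):
--     count_idx = num // pow(10, digit) % 10
--     end_loc = end_locs[count_idx]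
--     sorted[end_loc] = num
--     end_locs[count_idx] -= 1
--
--   return sorted
-- ===== SOURCE B (Python) =====
-- from typing import List
--
-- def cs5(nums: List[int], digit: int) -> List[int]:
--     buckets = [[] for _ in range(10)]
--     for num in nums:
--         count_idx = num // pow(10, digit) % 10
--         buckets[count_idx].append(num)
--     result = []
--     for bucket in buckets:
--         result.extend(bucket)
--     return result
-- ===== Notes on version B (the rewrite author's own statement) =====
-- stated objective: simpler
-- what changed: Replaced the count array, prefix-sum pass and reverse-order end-location placement with ten bucket lists filled in one forward pass and concatenated in index order.
-- outside the precondition, e.g. on cs5([3, 1], -1): A raises TypeError, B raises TypeError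
import Mathlib
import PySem

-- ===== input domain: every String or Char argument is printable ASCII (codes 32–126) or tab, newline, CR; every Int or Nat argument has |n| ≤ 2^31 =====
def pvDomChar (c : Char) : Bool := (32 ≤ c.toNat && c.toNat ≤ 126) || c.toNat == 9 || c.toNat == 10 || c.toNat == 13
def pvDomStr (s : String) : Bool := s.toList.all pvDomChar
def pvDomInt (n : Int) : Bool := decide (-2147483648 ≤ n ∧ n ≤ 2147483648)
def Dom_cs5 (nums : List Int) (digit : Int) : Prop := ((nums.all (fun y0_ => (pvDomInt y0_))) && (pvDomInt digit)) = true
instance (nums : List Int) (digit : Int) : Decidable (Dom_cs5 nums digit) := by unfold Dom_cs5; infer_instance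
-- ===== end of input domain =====

-- B replaces A's count/prefix-sum/reverse-placement passes by ten buckets filled in one
-- forward pass and concatenated; objective: simpler (same O(n) cost).

-- shared digit-key expression 'num // pow(10, digit) % 10' (appears literally in both Pythons)
def pvKey (digit num : Int) : Nat :=
  (PySem.Int.mod (PySem.Int.floordiv num (10 ^ digit.toNat)) 10).toNat

-- ===== PORT A =====
def cs5 (nums : List Int) (digit : Int) : List Int :=
  let count_array : List Int := nums.foldl
    (fun ca num => ca.set (pvKey digit num) (ca.getD (pvKey digit num) 0 + 1))
    (List.replicate 10 (0 : Int))
  let acc : Int × List Int := count_array.foldl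
    (fun st count => (st.1 + count, st.2 ++ [st.1 + count])) ((0 : Int), ([] : List Int))
  let end_locs : List Int := acc.2.map (fun d => d - 1)
  let sorted0 : List Int := List.replicate nums.length (0 : Int)
  let fin := nums.reverse.foldl
    (fun (st : List Int × List Int) num =>
      let ci := pvKey digit num
      let el := st.2.getD ci 0
      (PySem.List.pySetD st.1 el num, st.2.set ci (st.2.getD ci 0 - 1)))
    (sorted0, end_locs)
  fin.1

-- ===== PORT B =====
def cs5_alt (nums : List Int) (digit : Int) : List Int :=
  let buckets : List (List Int) := nums.foldl
    (fun bs num => bs.set (pvKey digit num) (bs.getD (pvKey digit num) [] ++ [num]))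
    (List.replicate 10 ([] : List Int))
  buckets.foldl (fun result bucket => result ++ bucket) []

-- ===== PRECONDITION & SPEC =====
-- Pre_ excludes digit < 0, where Python's pow(10, digit) is a float and both A and B raise TypeError.
def Pre_cs5 (nums : List Int) (digit : Int) : Prop := 0 ≤ digit
instance (nums : List Int) (digit : Int) : Decidable (Pre_cs5 nums digit) := by
  unfold Pre_cs5; infer_instance
def pvWitness_cs5 : List Int × Int := ([170, 45, 75, 90, 802, 24, 2, 66], 1)

def Spec_cs5 (nums : List Int) (digit : Int) (out : List Int) : Prop := out = cs5_alt nums digit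
instance (nums : List Int) (digit : Int) (out : List Int) : Decidable (Spec_cs5 nums digit out) := by unfold Spec_cs5; infer_instance

-- ===== CLAIM (what is proved, stated in full; the proofs are below) =====
def Claim_equal_cs5 : Prop := ∀ (nums : List Int) (digit : Int), Dom_cs5 nums digit → Pre_cs5 nums digit → Spec_cs5 nums digit (cs5 nums digit)

-- ===== LEMMAS AND PROOFS =====

theorem pvKey_lt (digit num : Int) : pvKey digit num < 10 := by
  unfold pvKey
  rw [PySem.Int.mod_eq_emod_of_pos (by norm_num : (0:Int) < 10)]
  have h1 := Int.emod_nonneg (PySem.Int.floordiv num (10 ^ digit.toNat)) (b := 10) (by norm_num)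
  have h2 := Int.emod_lt_of_pos (PySem.Int.floordiv num (10 ^ digit.toNat)) (b := 10) (by norm_num)
  omega

-- generic "table" lemma: a foldl updating slot (k x) equals the per-slot fold over filters
theorem table_foldl {β : Type} (k : Int → Nat) (f : Int → β → β) (dflt : β) :
    ∀ (l : List Int) (init : List β), (∀ x ∈ l, k x < init.length) →
    l.foldl (fun t x => t.set (k x) (f x (t.getD (k x) dflt))) init
      = (List.range init.length).map
          (fun d => (l.filter (fun x => k x = d)).foldl (fun b x => f x b) (init.getD d dflt)) := by
  intro l
  induction l with
  | nil =>
      intro init _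
      apply List.ext_getElem (by simp)
      intro i h1 h2
      have hi : i < init.length := by simpa using h1
      simp [List.getD_eq_getElem?_getD, List.getElem?_eq_getElem hi]
  | cons x t ih =>
      intro init hlt
      have hkx : k x < init.length := hlt x (by simp)
      rw [List.foldl_cons, ih _ (by intro y hy; simpa using hlt y (List.mem_cons_of_mem _ hy))]
      apply List.ext_getElem (by simp)
      intro i h1 h2
      simp only [List.getElem_map, List.getElem_range] at *
      have hi : i < init.length := by simpa using h1
      by_cases hd : k x = i
      · subst hd
        rw [List.filter_cons_of_pos (by simp), List.foldl_cons]
        congr 1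
        simp [List.getD_eq_getElem?_getD, hkx]
      · rw [List.filter_cons_of_neg (by simp [hd])]
        congr 1
        simp [List.getD_eq_getElem?_getD, List.getElem?_set_ne hd]

theorem foldl_add_one (l : List Int) : ∀ i : Int,
    l.foldl (fun b _ => b + 1) i = i + l.length := by
  induction l with
  | nil => simp
  | cons x t ih => intro i; simp [List.foldl_cons, ih]; omega

theorem foldl_app_singleton (l : List Int) : ∀ i : List Int,
    l.foldl (fun b x => b ++ [x]) i = i ++ l := by
  induction l with
  | nil => simp
  | cons x t ih => intro i; simp [List.foldl_cons, ih]

theorem foldl_append_flatten (l : List (List Int)) : ∀ a : List Int,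
    l.foldl (fun r b => r ++ b) a = a ++ l.flatten := by
  induction l with
  | nil => simp
  | cons x t ih => intro a; simp [List.foldl_cons, ih]

-- prefix-sum list of A's accumulation loop
def accList (s : Int) : List Int → List Int
  | [] => []
  | c :: cs => (s + c) :: accList (s + c) cs

theorem acc_foldl (l : List Int) : ∀ (s : Int) (a : List Int),
    l.foldl (fun st count => (st.1 + count, st.2 ++ [st.1 + count])) (s, a)
      = (s + l.sum, a ++ accList s l) := by
  induction l with
  | nil => simp [accList]
  | cons c t ih =>
      intro s a
      simp [List.foldl_cons, ih, accList, List.append_assoc]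
      ring

-- segment state: per digit a pair (not-yet-filled slots, already-placed tail)
def flatS : List (List Int × List Int) → List Int
  | [] => []
  | (j, q) :: ss => j ++ q ++ flatS ss

def locsOf (base : Nat) : List (List Int × List Int) → List Int
  | [] => []
  | (j, q) :: ss => ((base : Int) + j.length - 1) :: locsOf (base + j.length + q.length) ss

theorem set_append_cons (as bs : List Int) (b x : Int) :
    (as ++ b :: bs).set as.length x = as ++ x :: bs := by
  induction as with
  | nil => simp
  | cons a t ih => simp [ih]

theorem step_lemma :
    ∀ (segs : List (List Int × List Int)) (d : Nat) (pre : List Int) (x : Int)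
      (hd : d < segs.length), (segs[d]).1 ≠ [] →
      PySem.List.pySetD (pre ++ flatS segs) ((locsOf pre.length segs).getD d 0) x
          = pre ++ flatS (segs.set d ((segs[d]).1.dropLast, x :: (segs[d]).2))
      ∧ (locsOf pre.length segs).set d ((locsOf pre.length segs).getD d 0 - 1)
          = locsOf pre.length (segs.set d ((segs[d]).1.dropLast, x :: (segs[d]).2)) := by
  intro segs
  induction segs with
  | nil => intro d pre x hd; simp at hd
  | cons s ss ih =>
      obtain ⟨j, q⟩ := s
      intro d pre x hd hj
      cases d with
      | zero =>
          simp only [List.getElem_cons_zero] at hj ⊢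
          have hj1 : 1 ≤ j.length := List.length_pos_iff.mpr hj
          have hdl : j.dropLast.length = j.length - 1 := by simp
          constructor
          · simp only [locsOf, List.getD_cons_zero, flatS, List.set_cons_zero]
            rw [show (pre.length : Int) + j.length - 1
                  = ((pre.length + (j.length - 1) : Nat) : Int) by omega]
            rw [PySem.List.pySetD_natCast]
            have hsplit : pre ++ (j ++ q ++ flatS ss)
                = (pre ++ j.dropLast) ++ (j.getLast hj) :: (q ++ flatS ss) := by
              conv_lhs => rw [← List.dropLast_append_getLast hj]
              simp
            rw [hsplit]
            rw [show pre.length + (j.length - 1) = (pre ++ j.dropLast).length by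
              simp [hdl]]
            rw [set_append_cons]
            simp
          · simp only [locsOf, List.getD_cons_zero, List.set_cons_zero]
            congr 1
            · rw [hdl]; omega
            · congr 1
              simp only [hdl, List.length_cons]
              omega
      | succ d =>
          simp only [List.getElem_cons_succ] at hj
          have hd' : d < ss.length := by simpa using hd
          have := ih d (pre ++ j ++ q) x hd' hj
          constructor
          · simp only [locsOf, List.getD_cons_succ, flatS, List.set_cons_succ,
              List.getElem_cons_succ]
            rw [show pre ++ (j ++ q ++ flatS ss) = (pre ++ j ++ q) ++ flatS ss by simp]
            rw [show pre.length + j.length + q.length = (pre ++ j ++ q).length by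
              simp only [List.length_append]]
            rw [this.1]
            simp [flatS]
          · simp only [locsOf, List.getD_cons_succ, List.set_cons_succ,
              List.getElem_cons_succ]
            rw [show pre.length + j.length + q.length = (pre ++ j ++ q).length by
              simp only [List.length_append]]
            rw [this.2]

theorem loop_lemma (dg : Int) :
    ∀ (ys : List Int) (segs : List (List Int × List Int)), segs.length = 10 →
    (∀ d, d < 10 → (segs.getD d ([], [])).1.length
        = (ys.filter (fun x => pvKey dg x = d)).length) →
    (ys.foldl
      (fun (st : List Int × List Int) num =>
        let ci := pvKey dg num
        let el := st.2.getD ci 0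
        (PySem.List.pySetD st.1 el num, st.2.set ci (st.2.getD ci 0 - 1)))
      (flatS segs, locsOf 0 segs)).1
      = flatS ((List.range 10).map
          (fun d => (([] : List Int),
            (ys.filter (fun x => pvKey dg x = d)).reverse ++ (segs.getD d ([], [])).2))) := by
  intro ys
  induction ys with
  | nil =>
      intro segs hlen hcnt
      simp only [List.foldl_nil, List.filter_nil, List.length_nil, List.reverse_nil,
        List.nil_append]
      have hseg : segs = (List.range 10).map (fun d => (([] : List Int), (segs.getD d ([], [])).2)) := by
        apply List.ext_getElem (by simp [hlen])
        intro i h1 h2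
        have hi : i < 10 := by omega
        have hgd : segs.getD i ([], []) = segs[i] := by
          rw [List.getD_eq_getElem?_getD, List.getElem?_eq_getElem h1]
          rfl
        simp only [List.getElem_map, List.getElem_range]
        rw [hgd]
        have h0 : (segs[i]).1.length = 0 := by
          have := hcnt i hi
          rw [hgd] at this
          simpa using this
        exact Prod.ext (List.eq_nil_of_length_eq_zero h0) rfl
      conv_lhs => rw [hseg]
  | cons x ys ih =>
      intro segs hlen hcnt
      rw [List.foldl_cons]
      have hk : pvKey dg x < 10 := pvKey_lt dg x
      have hdlen : pvKey dg x < segs.length := by omega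
      have hgd : segs.getD (pvKey dg x) ([], []) = segs[pvKey dg x] := by
        rw [List.getD_eq_getElem?_getD, List.getElem?_eq_getElem hdlen]; rfl
      have hne : (segs[pvKey dg x]).1 ≠ [] := by
        have := hcnt (pvKey dg x) hk
        rw [hgd, List.filter_cons_of_pos (by simp)] at this
        intro hnil
        rw [hnil] at this
        simp at this
      obtain ⟨h1, h2⟩ := step_lemma segs (pvKey dg x) [] x hdlen hne
      simp only [List.nil_append, List.length_nil] at h1 h2
      simp only []
      rw [h1, h2]
      set segs' := segs.set (pvKey dg x)
        ((segs[pvKey dg x]).1.dropLast, x :: (segs[pvKey dg x]).2) with hsegs'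
      have hlen' : segs'.length = 10 := by simp [hsegs', hlen]
      have hgd' : ∀ e, e < 10 → segs'.getD e ([], [])
          = if e = pvKey dg x then ((segs[pvKey dg x]).1.dropLast, x :: (segs[pvKey dg x]).2)
            else segs.getD e ([], []) := by
        intro e he
        by_cases hcase : e = pvKey dg x
        · subst hcase
          rw [List.getD_eq_getElem?_getD, List.getElem?_set_self (by omega)]
          simp
        · rw [List.getD_eq_getElem?_getD, List.getElem?_set_ne (by omega),
            ← List.getD_eq_getElem?_getD]
          simp [hcase]
      have hcnt' : ∀ d, d < 10 → (segs'.getD d ([], [])).1.length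
          = (ys.filter (fun y => pvKey dg y = d)).length := by
        intro d hd
        have hh := hcnt d hd
        by_cases hcase : d = pvKey dg x
        · subst hcase
          rw [hgd, List.filter_cons_of_pos (by simp)] at hh
          simp only [List.length_cons] at hh
          have hgetd : segs'.getD (pvKey dg x) ([], [])
              = ((segs[pvKey dg x]).1.dropLast, x :: (segs[pvKey dg x]).2) := by
            rw [List.getD_eq_getElem?_getD, hsegs', List.getElem?_set_self (by omega)]
            simp
          rw [hgetd]
          simp only [List.length_dropLast]
          omega
        · rw [hgd' d hd, if_neg hcase]
          rw [List.filter_cons_of_neg (by simp [Ne.symm hcase])] at hh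
          exact hh
      rw [ih segs' hlen' hcnt']
      congr 1
      apply List.map_congr_left
      intro e he
      have he10 : e < 10 := by simpa using he
      rw [hgd' e he10]
      by_cases hcase : e = pvKey dg x
      · subst hcase
        rw [if_pos rfl, List.filter_cons_of_pos (by simp), hgd]
        simp
      · rw [if_neg hcase, List.filter_cons_of_neg (by simp [Ne.symm hcase])]

theorem indicator_sum : ∀ (m k : Nat), k < m →
    ((List.range m).map (fun d => if k = d then 1 else 0)).sum = 1 := by
  intro m
  induction m with
  | zero => intro k hk; omega
  | succ m ih =>
      intro k hk
      rw [List.range_succ, List.map_append, List.sum_append]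
      by_cases h : k = m
      · subst h
        have h0 : ((List.range k).map (fun d => if k = d then 1 else 0)).sum = 0 := by
          apply List.sum_eq_zero
          intro y hy
          simp only [List.mem_map, List.mem_range] at hy
          obtain ⟨d, hd, hy⟩ := hy
          rw [if_neg (by omega)] at hy
          omega
        simp [h0]
      · rw [ih k (by omega)]
        simp [h]

theorem sum_counts (dg : Int) : ∀ l : List Int,
    ((List.range 10).map (fun d => (l.filter (fun x => pvKey dg x = d)).length)).sum
      = l.length := by
  intro l
  induction l with
  | nil => simp
  | cons x t ih =>
      have hper : ∀ d, ((x :: t).filter (fun y => pvKey dg y = d)).length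
          = (t.filter (fun y => pvKey dg y = d)).length + (if pvKey dg x = d then 1 else 0) := by
        intro d
        by_cases h : pvKey dg x = d
        · rw [List.filter_cons_of_pos (by simp [h]), if_pos h]; simp
        · rw [List.filter_cons_of_neg (by simp [h]), if_neg h]
          simp
      simp only [hper]
      rw [List.sum_map_add, ih, indicator_sum 10 (pvKey dg x) (pvKey_lt dg x)]
      simp

theorem flat_init : ∀ ds : List Nat,
    flatS (ds.map (fun c => (List.replicate c (0:Int), ([] : List Int))))
      = List.replicate ds.sum (0:Int) := by
  intro ds
  induction ds with
  | nil => simp [flatS]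
  | cons c t ih =>
      simp only [List.map_cons, flatS, List.sum_cons, List.replicate_add, ih, List.append_nil]

theorem locs_init : ∀ (ds : List Nat) (b : Nat),
    locsOf b (ds.map (fun c => (List.replicate c (0:Int), ([] : List Int))))
      = (accList (b : Int) (ds.map (fun (c : Nat) => (c : Int)))).map (fun d => d - 1) := by
  intro ds
  induction ds with
  | nil => intro b; simp [locsOf, accList]
  | cons c t ih =>
      intro b
      simp only [List.map_cons, locsOf, accList, List.length_replicate, List.length_nil]
      congr 1
      have hc : ((b + c : Nat) : Int) = (b : Int) + c := by push_cast; ring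
      rw [show b + c + 0 = b + c by omega, ih (b + c), hc]

theorem cs5_alt_eq_flatten (nums : List Int) (digit : Int) :
    cs5_alt nums digit
      = ((List.range 10).map (fun d => nums.filter (fun x => pvKey digit x = d))).flatten := by
  unfold cs5_alt
  have h := table_foldl (pvKey digit) (fun x b => b ++ [x]) ([] : List Int) nums
    (List.replicate 10 ([] : List Int)) (by intro y _; simpa using pvKey_lt digit y)
  simp only [List.length_replicate] at h
  rw [h, foldl_append_flatten, List.nil_append]
  congr 1
  apply List.map_congr_left
  intro d hd
  rw [foldl_app_singleton]
  have hrep : (List.replicate 10 ([] : List Int)).getD d [] = [] := by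
    have hd10 : d < 10 := by simpa using hd
    rw [List.getD_eq_getElem?_getD, List.getElem?_replicate]
    simp [hd10]
  rw [hrep, List.nil_append]

theorem cs5_eq_flatten (nums : List Int) (digit : Int) :
    cs5 nums digit
      = ((List.range 10).map (fun d => nums.filter (fun x => pvKey digit x = d))).flatten := by
  have hca := table_foldl (pvKey digit) (fun _ b => b + (1:Int)) 0 nums
    (List.replicate 10 (0:Int)) (by intro y _; simpa using pvKey_lt digit y)
  simp only [List.length_replicate] at hca
  have hca2 : nums.foldl
      (fun ca num => ca.set (pvKey digit num) (ca.getD (pvKey digit num) 0 + 1))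
      (List.replicate 10 (0:Int))
      = ((List.range 10).map (fun d => (nums.filter (fun x => pvKey digit x = d)).length)).map
          (fun (c : Nat) => (c : Int)) := by
    rw [hca, List.map_map]
    apply List.map_congr_left
    intro d hd
    have hd10 : d < 10 := by simpa using hd
    have hrep : (List.replicate 10 (0:Int)).getD d 0 = 0 := by
      rw [List.getD_eq_getElem?_getD, List.getElem?_replicate]
      simp [hd10]
    simp only [Function.comp]
    rw [foldl_add_one, hrep]
    simp
  simp only [cs5]
  rw [hca2, acc_foldl, List.nil_append]
  simp only []
  set ds : List Nat := (List.range 10).map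
    (fun d => (nums.filter (fun x => pvKey digit x = d)).length) with hds
  set segs0 : List (List Int × List Int) :=
    ds.map (fun c => (List.replicate c (0:Int), ([] : List Int))) with hsegs0
  have harr : List.replicate nums.length (0:Int) = flatS segs0 := by
    rw [hsegs0, flat_init]
    congr 1
    rw [hds, sum_counts]
  have hlocs : (accList 0 (ds.map (fun (c : Nat) => (c : Int)))).map (fun d => d - 1)
      = locsOf 0 segs0 := by
    rw [hsegs0, locs_init]
    norm_num
  rw [harr, hlocs]
  have hlen0 : segs0.length = 10 := by simp [hsegs0, hds]
  have hcnt0 : ∀ d, d < 10 → (segs0.getD d ([], [])).1.length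
      = (nums.reverse.filter (fun x => pvKey digit x = d)).length := by
    intro d hd
    have hdlen : d < segs0.length := by omega
    rw [List.getD_eq_getElem?_getD, List.getElem?_eq_getElem hdlen]
    simp [hsegs0, hds, List.filter_reverse]
  rw [loop_lemma digit nums.reverse segs0 hlen0 hcnt0]
  have hq : ∀ d, d < 10 → (segs0.getD d ([], [])).2 = ([] : List Int) := by
    intro d hd
    have hdlen : d < segs0.length := by omega
    rw [List.getD_eq_getElem?_getD, List.getElem?_eq_getElem hdlen]
    simp [hsegs0, hds]
  have hmap : (List.range 10).map
      (fun d => (([] : List Int),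
        (nums.reverse.filter (fun x => pvKey digit x = d)).reverse ++ (segs0.getD d ([], [])).2))
      = (List.range 10).map
          (fun d => (([] : List Int), nums.filter (fun x => pvKey digit x = d))) := by
    apply List.map_congr_left
    intro d hd
    rw [hq d (by simpa using hd)]
    simp [List.filter_reverse]
  rw [hmap]
  have hflat : ∀ L : List (List Int),
      flatS (L.map (fun b => (([] : List Int), b))) = L.flatten := by
    intro L
    induction L with
    | nil => simp [flatS]
    | cons c t ih => simp [flatS, ih]
  rw [show (List.range 10).map (fun d => (([] : List Int), nums.filter (fun x => pvKey digit x = d)))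
        = ((List.range 10).map (fun d => nums.filter (fun x => pvKey digit x = d))).map
            (fun b => (([] : List Int), b)) by rw [List.map_map]; rfl]
  rw [hflat]

-- ===== VERDICT (by name: the statement is the Claim_ definition above) =====
theorem cs5_spec : Claim_equal_cs5 := by
  intro nums digit _ _
  unfold Spec_cs5
  rw [cs5_eq_flatten, cs5_alt_eq_flatten]
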